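-- pv_equiv track=rewrite | github.com/MrLostInTheInternet/FluidPyPLC | FluidPyPLC/data.py | lswitch_boolean
-- ===== SOURCE A (Python) =====
-- def lswitch_boolean(limit_switches):
--     lswitch_bool = ['TRUE',]
--     seen_letter = []
--     seen_switch = []
--     for i in range(1, len(limit_switches)):
--         limit_switch = limit_switches[i]
--         if limit_switch[0] not in seen_letter:
--             seen_letter.append(limit_switch[0])
--             seen_switch.append(limit_switch)
--             lswitch_bool.append('FALSE')
--         else:
--             if limit_switch not in seen_switch:
--                 lswitch_bool.append('TRUE')
--             else:
--                 lswitch_bool.append('FALSE')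
--     return lswitch_bool
-- ===== SOURCE B (Python) =====
-- def lswitch_boolean(limit_switches):
--     tail = limit_switches[1:]
--     return ['TRUE'] + [
--         'FALSE' if next(t for t in tail if t[0] == s[0]) == s else 'TRUE'
--         for s in tail
--     ]
-- ===== Notes on version B (the rewrite author's own statement) =====
-- stated objective: simpler
-- what changed: Drops A's incremental seen-letter/seen-switch bookkeeping entirely: stateless brute force where each tail element is marked FALSE iff it equals the first element of the tail sharing its initial character, found by an independent scan per element.
import Mathlib
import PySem

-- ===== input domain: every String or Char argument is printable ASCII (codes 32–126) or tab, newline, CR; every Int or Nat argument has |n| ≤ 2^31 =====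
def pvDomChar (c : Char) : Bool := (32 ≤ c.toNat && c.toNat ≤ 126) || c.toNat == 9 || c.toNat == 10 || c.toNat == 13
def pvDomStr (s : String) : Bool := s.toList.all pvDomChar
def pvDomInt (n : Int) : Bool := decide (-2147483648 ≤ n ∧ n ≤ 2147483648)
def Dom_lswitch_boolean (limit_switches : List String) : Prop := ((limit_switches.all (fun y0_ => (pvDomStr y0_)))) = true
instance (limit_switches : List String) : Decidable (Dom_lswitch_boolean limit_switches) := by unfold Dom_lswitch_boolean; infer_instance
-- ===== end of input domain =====

-- B drops A's seen-letter/seen-switch bookkeeping: each tail element is FALSE iff it equals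
-- the first tail element sharing its initial character, found by an independent scan (simpler).

-- s[0] : first character of s ('~' default is never used under Pre_, which requires nonemptiness)
def pvHd (s : String) : Char := (PySem.Str.pyGet? s 0).getD '~'

-- ===== PORT A =====
def pvStepA (st : List String × List Char × List String) (s : String) :
    List String × List Char × List String :=
  let (lswitch_bool, seen_letter, seen_switch) := st
  if pvHd s ∉ seen_letter then
    (lswitch_bool ++ ["FALSE"], seen_letter ++ [pvHd s], seen_switch ++ [s])
  else if s ∉ seen_switch then
    (lswitch_bool ++ ["TRUE"], seen_letter, seen_switch)
  else
    (lswitch_bool ++ ["FALSE"], seen_letter, seen_switch)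

def lswitch_boolean (limit_switches : List String) : List String :=
  ((PySem.List.pyRange 1 (limit_switches.length : Int) 1).foldl
    (fun st i => pvStepA st (PySem.List.pyGetD limit_switches i ""))
    (["TRUE"], [], [])).1

-- ===== PORT B =====
-- next(t for t in tail if t[0] == s[0]) → tail.find?; the .getD "" default is unreachable
-- since s itself is in tail and matches (under Pre_; Python's next never raises here).
def lswitch_boolean_alt (limit_switches : List String) : List String :=
  let tail := PySem.List.slice limit_switches (some 1) none
  ["TRUE"] ++ tail.map (fun s =>
    if (tail.find? (fun t => pvHd t == pvHd s)).getD "" == s then "FALSE" else "TRUE")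

-- ===== PRECONDITION & SPEC =====
-- Pre_ excludes inputs with an empty string after index 0: there A raises IndexError at s[0]
-- (and B raises the same IndexError), so neither program returns a value.
def Pre_lswitch_boolean (limit_switches : List String) : Prop :=
  ∀ s ∈ limit_switches.drop 1, s ≠ ""
instance (limit_switches : List String) : Decidable (Pre_lswitch_boolean limit_switches) := by
  unfold Pre_lswitch_boolean; infer_instance
def pvWitness_lswitch_boolean : List String := ["a+", "b0", "a+", "a1"]
def Spec_lswitch_boolean (limit_switches : List String) (out : List String) : Prop := out = lswitch_boolean_alt limit_switches
instance (limit_switches : List String) (out : List String) : Decidable (Spec_lswitch_boolean limit_switches out) := by unfold Spec_lswitch_boolean; infer_instance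

-- ===== CLAIM (what is proved, stated in full; the proofs are below) =====
def Claim_equal_lswitch_boolean : Prop := ∀ (limit_switches : List String), Dom_lswitch_boolean limit_switches → Pre_lswitch_boolean limit_switches → Spec_lswitch_boolean limit_switches (lswitch_boolean limit_switches)

-- ===== LEMMAS AND PROOFS =====

-- Invariant: after A has processed the prefix p of the tail, seen_letter L is exactly the set of
-- initial characters occurring in p, and seen_switch S is exactly the set of first occurrences
-- per initial character in p — both characterised through find? on p, the shape B's scan uses.

-- find? over a one-longer prefix, the step used to push the invariant forward
theorem pvFindSnoc (p : List String) (x : String) (c : Char) :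
    (p ++ [x]).find? (fun t => pvHd t == c)
      = (p.find? (fun t => pvHd t == c)).or (if pvHd x == c then some x else none) := by
  rw [List.find?_append]
  cases hb : (pvHd x == c) <;> simp [List.find?, hb]

theorem pvMain (rest : List String) (p bools : List String) (L : List Char) (S : List String)
    (h1 : ∀ c, c ∈ L ↔ (p.find? (fun t => pvHd t == c)).isSome = true)
    (h2 : ∀ y, y ∈ S ↔ p.find? (fun t => pvHd t == pvHd y) = some y) :
    (rest.foldl pvStepA (bools, L, S)).1
      = bools ++ rest.map (fun s =>
          if ((p ++ rest).find? (fun t => pvHd t == pvHd s)).getD "" == s then "FALSE" else "TRUE") := by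
  induction rest generalizing p bools L S with
  | nil => simp
  | cons x rest ih =>
    have hsplit : p ++ x :: rest = (p ++ [x]) ++ rest := by simp
    by_cases hx : pvHd x ∈ L
    · -- letter already seen in p: find? on p succeeds
      obtain ⟨v, hv⟩ := Option.isSome_iff_exists.mp ((h1 (pvHd x)).mp hx)
      have hfull : (p ++ x :: rest).find? (fun t => pvHd t == pvHd x) = some v := by
        rw [List.find?_append, hv]; rfl
      have h1' : ∀ c, c ∈ L ↔ ((p ++ [x]).find? (fun t => pvHd t == c)).isSome = true := by
        intro c; rw [h1 c, pvFindSnoc]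
        cases hc : p.find? (fun t => pvHd t == c) with
        | some w => simp
        | none =>
          simp only [Option.none_or, Option.isSome_none, Bool.false_eq_true, false_iff]
          by_cases hb : (pvHd x == c) = true
          · have : c = pvHd x := (beq_iff_eq.mp hb).symm
            subst this; rw [hv] at hc; simp at hc
          · simp [hb]
      have h2' : ∀ y, y ∈ S ↔ (p ++ [x]).find? (fun t => pvHd t == pvHd y) = some y := by
        intro y; rw [h2 y, pvFindSnoc]
        cases hc : p.find? (fun t => pvHd t == pvHd y) with
        | some w => simp
        | none =>
          simp only [Option.none_or]
          constructor
          · intro h; simp at h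
          · intro h
            by_cases hb : (pvHd x == pvHd y) = true
            · rw [if_pos hb] at h
              have hxy : x = y := Option.some.inj h
              subst hxy
              rw [hv] at hc; simp at hc
            · rw [if_neg hb] at h; simp at h
      by_cases hmem : x ∈ S
      · have hvx : (v == x) = true := by
          have hh := (h2 x).mp hmem; rw [hv] at hh
          exact beq_iff_eq.mpr (Option.some.inj hh)
        simp only [List.foldl_cons, pvStepA, hx, not_true_eq_false, if_false, hmem,
          List.map_cons, hfull, Option.getD_some, hvx, if_true]
        rw [hsplit, ih (p ++ [x]) _ L S h1' h2']
        simp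
      · have hvx : ¬ (v == x) = true := by
          intro h
          exact hmem ((h2 x).mpr (by rw [hv, beq_iff_eq.mp h]))
        simp only [List.foldl_cons, pvStepA, hx, not_true_eq_false, if_false, hmem,
          not_false_eq_true, if_true, List.map_cons, hfull, Option.getD_some, hvx]
        rw [hsplit, ih (p ++ [x]) _ L S h1' h2']
        simp
    · -- new letter: find? on p fails, so x itself is the first of its letter
      have hnone : p.find? (fun t => pvHd t == pvHd x) = none := by
        cases hc : p.find? (fun t => pvHd t == pvHd x) with
        | none => rfl
        | some w => exact absurd ((h1 (pvHd x)).mpr (by rw [hc]; rfl)) hx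
      have hfull : (p ++ x :: rest).find? (fun t => pvHd t == pvHd x) = some x := by
        rw [List.find?_append, hnone, Option.none_or]
        simp [List.find?]
      have h1' : ∀ c, c ∈ L ++ [pvHd x] ↔ ((p ++ [x]).find? (fun t => pvHd t == c)).isSome = true := by
        intro c
        rw [List.mem_append, h1 c, pvFindSnoc]
        cases hc : p.find? (fun t => pvHd t == c) with
        | some w => simp
        | none =>
          simp only [Option.isSome_none, Bool.false_eq_true, false_or, Option.none_or,
            List.mem_singleton]
          by_cases hb : (pvHd x == c) = true
          · have : c = pvHd x := (beq_iff_eq.mp hb).symm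
            simp [hb, this]
          · have : ¬ c = pvHd x := fun h => hb (beq_iff_eq.mpr h.symm)
            simp [hb, this, Ne.symm this]
      have h2' : ∀ y, y ∈ S ++ [x] ↔ (p ++ [x]).find? (fun t => pvHd t == pvHd y) = some y := by
        intro y
        rw [List.mem_append, h2 y, pvFindSnoc]
        cases hc : p.find? (fun t => pvHd t == pvHd y) with
        | some w =>
          simp only [Option.some_or, List.mem_singleton]
          constructor
          · rintro (h | h)
            · exact h
            · subst h; rw [hnone] at hc; simp at hc
          · intro h; exact Or.inl h
        | none =>
          simp only [Option.none_or, List.mem_singleton, reduceCtorEq, false_or]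
          by_cases hb : (pvHd x == pvHd y) = true
          · rw [if_pos hb]
            constructor
            · intro h; simp [h]
            · intro h; exact (Option.some.inj h).symm
          · rw [if_neg hb]
            constructor
            · intro h; exact absurd (by simp [h] : (pvHd x == pvHd y) = true) hb
            · intro h; simp at h
      simp only [List.foldl_cons, pvStepA, hx, not_false_eq_true, if_true, List.map_cons,
        hfull, Option.getD_some, beq_self_eq_true, if_true]
      rw [hsplit, ih (p ++ [x]) _ (L ++ [pvHd x]) (S ++ [x]) h1' h2']
      simp

-- ===== VERDICT (by name: the statement is the Claim_ definition above) =====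
theorem lswitch_boolean_spec : Claim_equal_lswitch_boolean := by
  intro limit_switches _ _
  unfold Spec_lswitch_boolean lswitch_boolean lswitch_boolean_alt
  rw [PySem.List.foldl_pyRange_pyGetD' limit_switches "" pvStepA ((["TRUE"], [], []))
    (by norm_num : (0 : Int) ≤ 1)]
  rw [PySem.List.slice_from_one]
  have h := pvMain (limit_switches.drop 1) [] ["TRUE"] [] []
    (by intro c; simp) (by intro y; simp)
  simpa [List.drop_one] using h
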